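-- pv_equiv track=rewrite | github.com/ds4dh/medical_report_generation | src/llm_generation/report_generation/utils.py | remove_lines_after_condition
-- ===== SOURCE A (Python) =====
-- def remove_lines_after_condition(text: str) -> str:
--     """
--     Remove lines after conclusion/summary headers (for transcripts).
--
--     Args:
--         text: Input text
--
--     Returns:
--         Cleaned text
--     """
--     lines = text.split('\n')
--     result = []
--
--     for line in lines:
--         if 'conclusion' in line.lower() and '###' in line:
--             break
--         if 'summary' in line.lower() and '###' in line:
--             break
--         result.append(line)
--
--     return '\n'.join(result)
-- ===== SOURCE B (Python) =====
-- def remove_lines_after_condition(text: str) -> str: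
--     """Position scan over the raw string: find the start of the first
--     conclusion/summary header line and slice the text before it, instead of
--     splitting into a line list and re-joining."""
--     n = len(text)
--     pos = 0
--     while pos <= n:
--         end = pos
--         while end < n and text[end] != '\n':
--             end += 1
--         line = text[pos:end]
--         low = line.lower()
--         if '###' in line and ('conclusion' in low or 'summary' in low):
--             return text[:max(pos - 1, 0)]
--         if end == n:
--             return text
--         pos = end + 1
--     return text
-- ===== Notes on version B (the rewrite author's own statement) =====
-- stated objective: alternative
-- what changed: Instead of splitting the text into a line list, filtering lines with a break loop and re-joining, B scans character positions in the raw string, finds the start of the first conclusion/summary header line and returns the slice of the original text before it (or the text unchanged).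
import Mathlib
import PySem

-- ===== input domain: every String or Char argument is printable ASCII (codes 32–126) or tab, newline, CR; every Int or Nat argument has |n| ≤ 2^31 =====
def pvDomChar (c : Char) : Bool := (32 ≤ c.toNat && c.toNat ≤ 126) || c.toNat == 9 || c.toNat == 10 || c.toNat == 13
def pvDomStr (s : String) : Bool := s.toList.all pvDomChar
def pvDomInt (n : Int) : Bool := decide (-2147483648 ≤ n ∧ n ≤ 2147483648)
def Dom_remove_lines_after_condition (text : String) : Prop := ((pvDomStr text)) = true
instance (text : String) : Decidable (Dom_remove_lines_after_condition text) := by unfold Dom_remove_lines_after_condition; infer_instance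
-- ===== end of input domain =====

-- B replaces A's split-lines/filter/re-join with a position scan over the raw string that
-- slices the text before the first conclusion/summary header line (alternative, same cost).

-- ===== PORT A =====
-- the for-loop with break: collect lines until a header line is hit
def pvALoop (lines : List (List Char)) : List (List Char) :=
  match lines with
  | [] => []
  | l :: ls =>
    if PySem.Chars.isIn "conclusion".toList (PySem.Chars.lower l) && PySem.Chars.isIn "###".toList l then []
    else if PySem.Chars.isIn "summary".toList (PySem.Chars.lower l) && PySem.Chars.isIn "###".toList l then []
    else l :: pvALoop ls

def remove_lines_after_condition (text : String) : String :=
  let lines := PySem.Chars.splitOn text.toList "\n".toList   -- text.split('\n')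
  String.mk (PySem.Chars.join "\n".toList (pvALoop lines))   -- '\n'.join(result)

-- ===== PORT B =====
def pvBCond (line : List Char) : Bool :=
  PySem.Chars.isIn "###".toList line &&
    (PySem.Chars.isIn "conclusion".toList (PySem.Chars.lower line) ||
     PySem.Chars.isIn "summary".toList (PySem.Chars.lower line))

-- the outer while loop of Source B; the inner while that advances `end` to the next '\n'
-- computes exactly the takeWhile below (line = text[pos:end])
def pvBGo (text : List Char) (pos : Nat) : List Char :=
  if h : pos ≤ text.length then
    let line := (text.drop pos).takeWhile (fun c => c ≠ '\n')
    if pvBCond line then text.take (pos - 1)          -- text[:max(pos-1, 0)]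
    else if pos + line.length = text.length then text -- end == n
    else pvBGo text (pos + line.length + 1)           -- pos = end + 1
  else text
termination_by text.length - pos
decreasing_by
  have hl : line.length ≤ (text.drop pos).length :=
    List.IsPrefix.length_le (List.takeWhile_prefix _)
  simp [List.length_drop] at hl
  omega

def remove_lines_after_condition_alt (text : String) : String :=
  String.mk (pvBGo text.toList 0)

-- ===== PRECONDITION & SPEC =====
def Spec_remove_lines_after_condition (text : String) (out : String) : Prop := out = remove_lines_after_condition_alt text
instance (text : String) (out : String) : Decidable (Spec_remove_lines_after_condition text out) := by unfold Spec_remove_lines_after_condition; infer_instance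

-- ===== CLAIM (what is proved, stated in full; the proofs are below) =====
def Claim_equal_remove_lines_after_condition : Prop := ∀ (text : String), Dom_remove_lines_after_condition text → Spec_remove_lines_after_condition text (remove_lines_after_condition text)

-- ===== LEMMAS AND PROOFS =====

-- structural version of split-on-newline, and the position of the first header line
def pvSplitNl (s : List Char) : List (List Char) :=
  match s with
  | [] => [[]]
  | c :: rest =>
    if c = '\n' then [] :: pvSplitNl rest
    else match pvSplitNl rest with
         | [] => [[c]]
         | a :: as => (c :: a) :: as

def pvCond (l : List Char) : Bool :=
  (PySem.Chars.isIn "conclusion".toList (PySem.Chars.lower l) && PySem.Chars.isIn "###".toList l) ||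
  (PySem.Chars.isIn "summary".toList (PySem.Chars.lower l) && PySem.Chars.isIn "###".toList l)

-- start offset of the first matching line inside the joined string, if any
def pvCutAux (lines : List (List Char)) : Option Nat :=
  match lines with
  | [] => none
  | l :: ls => if pvCond l then some 0 else (pvCutAux ls).map (fun m => l.length + 1 + m)

theorem pvSplitNl_ne_nil (s : List Char) : pvSplitNl s ≠ [] := by
  match s with
  | [] => simp [pvSplitNl]
  | c :: rest =>
    simp only [pvSplitNl]
    split
    · simp
    · split <;> simp

theorem pvBCond_eq (l : List Char) : pvBCond l = pvCond l := by
  unfold pvBCond pvCond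
  cases PySem.Chars.isIn "###".toList l <;>
    cases PySem.Chars.isIn "conclusion".toList (PySem.Chars.lower l) <;>
      cases PySem.Chars.isIn "summary".toList (PySem.Chars.lower l) <;> rfl

theorem pvALoop_cons_break {l : List Char} (ls : List (List Char)) (hc : pvCond l = true) :
    pvALoop (l :: ls) = [] := by
  unfold pvALoop
  split_ifs with h1 h2
  · rfl
  · rfl
  · exfalso
    simp only [pvCond, Bool.or_eq_true] at hc
    rcases hc with h | h
    · exact h1 h
    · exact h2 h

theorem pvALoop_cons_keep {l : List Char} (ls : List (List Char)) (hc : pvCond l = false) :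
    pvALoop (l :: ls) = l :: pvALoop ls := by
  simp only [pvCond, Bool.or_eq_false_iff] at hc
  obtain ⟨h1, h2⟩ := hc
  unfold pvALoop
  rw [if_neg (by rw [h1]; exact Bool.false_ne_true), if_neg (by rw [h2]; exact Bool.false_ne_true)]
  rw [← pvALoop.eq_def]

-- the fuel-based splitOn.go computes pvSplitNl
def pvPrependFirst (p : List Char) (xs : List (List Char)) : List (List Char) :=
  match xs with
  | [] => [p]
  | a :: as => (p ++ a) :: as

theorem pvPrependFirst_nil (xs : List (List Char)) (h : xs ≠ []) : pvPrependFirst [] xs = xs := by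
  cases xs with
  | nil => exact absurd rfl h
  | cons a as => simp [pvPrependFirst]

theorem pvSplitOn_go_eq (fuel : Nat) : ∀ (l cur : List Char) (acc : List (List Char)),
    l.length ≤ fuel →
    PySem.Chars.splitOn.go ['\n'] fuel l cur acc
      = acc.reverse ++ pvPrependFirst cur.reverse (pvSplitNl l) := by
  induction fuel with
  | zero =>
    intro l cur acc h
    have : l = [] := List.eq_nil_of_length_eq_zero (Nat.le_zero.mp h)
    subst this
    simp [PySem.Chars.splitOn.go, pvSplitNl, pvPrependFirst]
  | succ f ih =>
    intro l cur acc h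
    match l with
    | [] => simp [PySem.Chars.splitOn.go, pvSplitNl, pvPrependFirst]
    | c :: rest =>
      by_cases hc : c = '\n'
      · subst hc
        have hpre : List.isPrefixOf ['\n'] ('\n' :: rest) = true := by
          simp [List.isPrefixOf]
        rw [show PySem.Chars.splitOn.go ['\n'] (f+1) ('\n' :: rest) cur acc
              = PySem.Chars.splitOn.go ['\n'] f (List.drop (['\n'] : List Char).length ('\n' :: rest)) [] (cur.reverse :: acc) from by
            conv_lhs => rw [PySem.Chars.splitOn.go]
            simp [hpre]]
        simp only [List.length_singleton, List.drop_succ_cons, List.drop_zero]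
        rw [ih rest [] (cur.reverse :: acc) (by simpa using Nat.lt_succ_iff.mp (by simpa using h))]
        simp only [List.reverse_nil]
        rw [pvPrependFirst_nil _ (pvSplitNl_ne_nil rest)]
        simp [pvSplitNl, pvPrependFirst]
      · have hpre : List.isPrefixOf ['\n'] (c :: rest) = false := by
          simp [List.isPrefixOf]
          intro hcc; exact absurd hcc.symm hc
        rw [show PySem.Chars.splitOn.go ['\n'] (f+1) (c :: rest) cur acc
              = PySem.Chars.splitOn.go ['\n'] f rest (c :: cur) acc from by
            conv_lhs => rw [PySem.Chars.splitOn.go]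
            simp [hpre]]
        rw [ih rest (c :: cur) acc (by simpa using Nat.lt_succ_iff.mp (by simpa using h))]
        congr 1
        simp only [pvSplitNl, if_neg hc]
        cases hs : pvSplitNl rest with
        | nil => exact absurd hs (pvSplitNl_ne_nil rest)
        | cons a as => simp [pvPrependFirst]

theorem pvSplitOn_eq (s : List Char) : PySem.Chars.splitOn s ['\n'] = pvSplitNl s := by
  unfold PySem.Chars.splitOn
  rw [pvSplitOn_go_eq (s.length + 1) s [] [] (Nat.le_succ _)]
  simp [pvPrependFirst_nil _ (pvSplitNl_ne_nil s)]

theorem pvJoin_splitNl (s : List Char) : PySem.Chars.join ['\n'] (pvSplitNl s) = s := by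
  induction s with
  | nil => simp [pvSplitNl, PySem.Chars.join, List.intercalate]
  | cons c rest ih =>
    simp only [pvSplitNl]
    by_cases hc : c = '\n'
    · subst hc
      cases hs : pvSplitNl rest with
      | nil => exact absurd hs (pvSplitNl_ne_nil rest)
      | cons a as =>
        rw [hs] at ih
        simpa [PySem.Chars.join, List.intercalate] using congrArg (fun t => '\n' :: t) ih
    · rw [if_neg hc]
      cases hs : pvSplitNl rest with
      | nil => exact absurd hs (pvSplitNl_ne_nil rest)
      | cons a as =>
        rw [hs] at ih
        cases as with
        | nil => simpa [PySem.Chars.join, List.intercalate] using ih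
        | cons b bs =>
          simp only [PySem.Chars.join, List.intercalate] at ih ⊢
          simp only [List.intersperse] at ih ⊢
          simpa using congrArg (fun t => c :: t) ih

theorem pvALoop_of_cutAux_none (ls : List (List Char)) (h : pvCutAux ls = none) : pvALoop ls = ls := by
  induction ls with
  | nil => rfl
  | cons l ls ih =>
    simp only [pvCutAux] at h
    by_cases hc : pvCond l
    · simp [hc] at h
    · rw [if_neg hc] at h
      rw [pvALoop_cons_keep ls (Bool.not_eq_true _ ▸ hc : pvCond l = false)]
      rw [ih (Option.map_eq_none_iff.mp h)]

-- join '\n' of a nonempty cons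
theorem pvJoin_cons (l : List Char) (ls : List (List Char)) (h : ls ≠ []) :
    PySem.Chars.join ['\n'] (l :: ls) = l ++ '\n' :: PySem.Chars.join ['\n'] ls := by
  cases ls with
  | nil => exact absurd rfl h
  | cons b bs =>
    simp [PySem.Chars.join, List.intercalate, List.intersperse]

-- A's loop result as a slice of the joined string
theorem pvA_char (ls : List (List Char)) :
    PySem.Chars.join ['\n'] (pvALoop ls)
      = (match pvCutAux ls with
         | some m => (PySem.Chars.join ['\n'] ls).take (m - 1)
         | none => PySem.Chars.join ['\n'] ls) := by
  induction ls with
  | nil => rfl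
  | cons l ls ih =>
    by_cases hc : pvCond l
    · rw [pvALoop_cons_break ls hc]
      simp [pvCutAux, hc, PySem.Chars.join, List.intercalate]
    · have hcf : pvCond l = false := Bool.not_eq_true _ ▸ hc
      rw [pvALoop_cons_keep ls hcf]
      simp only [pvCutAux, hcf, Bool.false_eq_true, if_false]
      cases hm : pvCutAux ls with
      | none =>
        rw [pvALoop_of_cutAux_none ls hm]
        simp
      | some m =>
        rw [hm] at ih
        simp only [Option.map_some]
        have hlsne : ls ≠ [] := by
          intro hn; rw [hn] at hm; simp [pvCutAux] at hm
        cases hls : ls with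
        | nil => exact absurd hls hlsne
        | cons b bs =>
          rw [← hls]
          cases hmz : m with
          | zero =>
            -- the very next line matches: only l is kept
            have hcb : pvCond b = true := by
              rw [hls] at hm
              simp only [pvCutAux] at hm
              by_cases hcb' : pvCond b
              · exact hcb'
              · rw [if_neg hcb'] at hm
                subst hmz
                cases hx : pvCutAux bs <;> simp [hx] at hm
            have haux : pvALoop ls = [] := by rw [hls]; exact pvALoop_cons_break bs hcb
            rw [haux, pvJoin_cons l ls hlsne]
            simp [PySem.Chars.join, List.intercalate]
          | succ m' =>
            have hcbf : pvCond b = false := by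
              rw [hls] at hm
              simp only [pvCutAux] at hm
              by_cases hcb' : pvCond b
              · rw [if_pos hcb'] at hm
                simp [hmz] at hm
              · exact Bool.not_eq_true _ ▸ hcb'
            have haux_ne : pvALoop ls ≠ [] := by
              rw [hls, pvALoop_cons_keep bs hcbf]
              simp
            rw [pvJoin_cons l (pvALoop ls) haux_ne, pvJoin_cons l ls hlsne, ih]
            have hmeq : l.length + 1 + (m' + 1) - 1 = l.length + 1 + m' := by omega
            rw [hmz, hmeq]
            rw [List.take_append]
            have h1 : l.length + 1 + m' - l.length = m' + 1 := by omega
            simp only [List.take_of_length_le (by omega : l.length ≤ l.length + 1 + m'), h1]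
            simp

-- splitNl of a string with no newline, and of a string starting with a newline-free prefix
theorem pvSplitNl_no_nl (s : List Char) (h : ∀ c ∈ s, c ≠ '\n') : pvSplitNl s = [s] := by
  induction s with
  | nil => rfl
  | cons c rest ih =>
    have hc : c ≠ '\n' := h c (by simp)
    simp only [pvSplitNl, if_neg hc]
    rw [ih (fun x hx => h x (by simp [hx]))]

theorem pvSplitNl_append (a b : List Char) (h : ∀ c ∈ a, c ≠ '\n') :
    pvSplitNl (a ++ '\n' :: b) = a :: pvSplitNl b := by
  induction a with
  | nil => simp [pvSplitNl]
  | cons c rest ih =>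
    have hc : c ≠ '\n' := h c (by simp)
    simp only [List.cons_append, pvSplitNl, if_neg hc]
    rw [ih (fun x hx => h x (by simp [hx]))]

theorem pvDropWhileHeadFalse {p : Char → Bool} {rest : List Char} {d : Char} {ds : List Char}
    (h : rest.dropWhile p = d :: ds) : p d = false := by
  have := List.head_dropWhile_not p (l := rest) (by simp [h])
  simpa [h] using this

-- main invariant of B's scan
theorem pvBGo_eq (text : List Char) : ∀ pos, pos ≤ text.length →
    pvBGo text pos
      = (match pvCutAux (pvSplitNl (text.drop pos)) with
         | some m => text.take (pos + m - 1)
         | none => text) := by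
  intro pos
  induction hfuel : text.length - pos using Nat.strong_induction_on generalizing pos with
  | _ f ih =>
  intro hpos
  rw [pvBGo]
  rw [dif_pos hpos]
  set rest := text.drop pos with hrest
  set line := rest.takeWhile (fun c => c ≠ '\n') with hline
  have hmem : ∀ c ∈ line, c ≠ '\n' := by
    intro c hcm
    have := List.mem_takeWhile_imp hcm
    simpa using this
  have hlen : line.length ≤ rest.length := List.IsPrefix.length_le (List.takeWhile_prefix _)
  have hrl : rest.length = text.length - pos := by simp [hrest]
  by_cases hcond : pvBCond line
  · -- first line matches
    rw [if_pos hcond]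
    have hcl : pvCond line = true := by rw [← pvBCond_eq]; exact hcond
    have hcut0 : pvCutAux (pvSplitNl rest) = some 0 := by
      by_cases hall : line.length = rest.length
      · have heq : line = rest :=
          List.IsPrefix.eq_of_length (List.takeWhile_prefix _) hall
        rw [heq] at hmem hcl
        rw [pvSplitNl_no_nl rest hmem]
        simp [pvCutAux, hcl]
      · have hta : line ++ rest.dropWhile (fun c => c ≠ '\n') = rest := List.takeWhile_append_dropWhile
        have hdw : rest.dropWhile (fun c => c ≠ '\n') ≠ [] := by
          intro hnil
          rw [hnil, List.append_nil] at hta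
          exact hall (by rw [hta])
        cases hdwc : rest.dropWhile (fun c => c ≠ '\n') with
        | nil => exact absurd hdwc hdw
        | cons d ds =>
          have hd : d = '\n' := by
            have := pvDropWhileHeadFalse hdwc
            simpa using this
          subst hd
          rw [hdwc] at hta
          rw [← hta, pvSplitNl_append line ds hmem]
          simp [pvCutAux, hcl]
    rw [hcut0]
    simp
  · rw [if_neg hcond]
    have hcl : pvCond line = false := by
      rw [← pvBCond_eq]
      exact Bool.not_eq_true _ ▸ hcond
    by_cases hend : pos + line.length = text.length
    · -- last line, no newline after
      rw [if_pos hend]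
      have hall : line.length = rest.length := by omega
      have heq : line = rest :=
        List.IsPrefix.eq_of_length (List.takeWhile_prefix _) hall
      rw [heq] at hmem hcl
      rw [pvSplitNl_no_nl rest hmem]
      simp [pvCutAux, hcl]
    · rw [if_neg hend]
      have hlt : pos + line.length < text.length := by omega
      have hdecomp : pvSplitNl rest = line :: pvSplitNl (text.drop (pos + line.length + 1)) := by
        have hta : line ++ rest.dropWhile (fun c => c ≠ '\n') = rest := List.takeWhile_append_dropWhile
        have hdw : rest.dropWhile (fun c => c ≠ '\n') ≠ [] := by
          intro hnil
          rw [hnil, List.append_nil] at hta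
          have : line.length = rest.length := by rw [hta]
          omega
        cases hdwc : rest.dropWhile (fun c => c ≠ '\n') with
        | nil => exact absurd hdwc hdw
        | cons d ds =>
          have hd : d = '\n' := by
            have := pvDropWhileHeadFalse hdwc
            simpa using this
          subst hd
          rw [hdwc] at hta
          have hds : ds = text.drop (pos + line.length + 1) := by
            have h1 : rest = line ++ '\n' :: ds := hta.symm
            have h2 : text.drop (pos + line.length + 1) = rest.drop (line.length + 1) := by
              rw [hrest, List.drop_drop]
              congr 1
            rw [h2, h1]
            simp
          rw [← hta, pvSplitNl_append line ds hmem, hds]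
      rw [hdecomp]
      simp only [pvCutAux, hcl, Bool.false_eq_true, if_false]
      have hrec := ih (text.length - (pos + line.length + 1)) (by omega) (pos + line.length + 1) rfl (by omega)
      rw [hrec]
      cases hm : pvCutAux (pvSplitNl (text.drop (pos + line.length + 1))) with
      | none => simp
      | some m =>
        simp only [Option.map_some]
        congr 1
        omega

-- ===== VERDICT (by name: the statement is the Claim_ definition above) =====
theorem remove_lines_after_condition_spec : Claim_equal_remove_lines_after_condition := by
  intro text _
  unfold Spec_remove_lines_after_condition remove_lines_after_condition remove_lines_after_condition_alt
  have hsep : ("\n".toList : List Char) = ['\n'] := rfl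
  show String.mk (PySem.Chars.join "\n".toList (pvALoop (PySem.Chars.splitOn text.toList "\n".toList))) = String.mk (pvBGo text.toList 0)
  rw [hsep, pvSplitOn_eq, pvA_char, pvBGo_eq text.toList 0 (Nat.zero_le _)]
  simp only [List.drop_zero]
  cases hm : pvCutAux (pvSplitNl text.toList) with
  | none => rw [pvJoin_splitNl]
  | some m => rw [pvJoin_splitNl]; simp
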